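-- pv_equiv track=rewrite | github.com/Cephrius/COSC-1351 | Python/code/Python PayPal Summer 2023 University Intern SE Test.py | maxValNumOfOccurrences
-- ===== SOURCE A (Python) =====
-- def maxValNumOfOccurrences(nums):
--     maxVal = nums[0]
--     count = 0
--
--     for val in nums:
--         if val > maxVal:
--             maxVal = val
--             count = 1
--         elif val == maxVal:
--             count += 1
--     return [maxVal,count]
-- ===== SOURCE B (Python) =====
-- def maxValNumOfOccurrences(nums):
--     maxVal = max(nums)
--     return [maxVal, nums.count(maxVal)]
-- ===== Notes on version B (the rewrite author's own statement) =====
-- stated objective: simpler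
-- what changed: Replaces the single running-max-with-reset-counter loop by two separate library passes: take max(nums) then count its occurrences.
import Mathlib
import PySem

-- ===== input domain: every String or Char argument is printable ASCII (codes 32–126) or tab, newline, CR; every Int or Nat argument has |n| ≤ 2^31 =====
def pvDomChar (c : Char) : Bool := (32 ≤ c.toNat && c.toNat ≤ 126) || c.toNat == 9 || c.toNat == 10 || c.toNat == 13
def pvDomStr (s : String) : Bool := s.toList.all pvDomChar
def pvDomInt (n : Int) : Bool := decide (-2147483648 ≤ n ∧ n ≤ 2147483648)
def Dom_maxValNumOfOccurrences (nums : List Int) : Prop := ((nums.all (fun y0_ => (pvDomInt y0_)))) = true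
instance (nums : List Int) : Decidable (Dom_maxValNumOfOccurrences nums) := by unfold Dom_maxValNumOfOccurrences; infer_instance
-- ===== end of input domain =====

-- B is a simpler two-pass formulation (max, then count); return values proved equal on nonempty lists.

-- ===== PORT A =====
-- A's loop: running max with a counter that resets to 1 on a new max, increments on an equal value.
def maxValNumOfOccurrences (nums : List Int) : List Int :=
  match PySem.List.pyGet? nums 0 with
  | none => []   -- nums[0] raises IndexError on []; excluded by Pre_
  | some m0 =>
      let st := nums.foldl
        (fun (s : Int × Int) val =>
          if val > s.1 then (val, 1)
          else if val = s.1 then (s.1, s.2 + 1)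
          else s)
        (m0, 0)
      [st.1, st.2]

-- ===== PORT B =====
-- B: maxVal = max(nums); return [maxVal, nums.count(maxVal)]
def maxValNumOfOccurrences_alt (nums : List Int) : List Int :=
  match PySem.List.max? nums (fun x => x) with
  | none => []   -- max([]) raises ValueError; excluded by Pre_
  | some m => [m, (PySem.List.count nums m : Int)]

-- ===== PRECONDITION & SPEC =====
-- Pre_ excludes exactly the empty list, on which both Pythons raise (IndexError / ValueError).
def Pre_maxValNumOfOccurrences (nums : List Int) : Prop := nums ≠ []
instance (nums : List Int) : Decidable (Pre_maxValNumOfOccurrences nums) := by unfold Pre_maxValNumOfOccurrences; infer_instance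
def pvWitness_maxValNumOfOccurrences : List Int := [3, 1, 3]

def Spec_maxValNumOfOccurrences (nums : List Int) (out : List Int) : Prop := out = maxValNumOfOccurrences_alt nums
instance (nums : List Int) (out : List Int) : Decidable (Spec_maxValNumOfOccurrences nums out) := by unfold Spec_maxValNumOfOccurrences; infer_instance

-- ===== CLAIM (what is proved, stated in full; the proofs are below) =====
def Claim_equal_maxValNumOfOccurrences : Prop := ∀ (nums : List Int), Dom_maxValNumOfOccurrences nums → Pre_maxValNumOfOccurrences nums → Spec_maxValNumOfOccurrences nums (maxValNumOfOccurrences nums)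

-- ===== LEMMAS AND PROOFS =====

-- Characterisation of A's fold: final max is the running max, final count is the
-- carried count (kept only if no element beats m) plus the occurrences of the final max.
theorem foldA_eq (l : List Int) : ∀ (m c : Int),
    l.foldl (fun (s : Int × Int) val =>
        if val > s.1 then (val, 1)
        else if val = s.1 then (s.1, s.2 + 1)
        else s) (m, c)
    = (l.foldl max m,
       (if l.foldl max m = m then c else 0) + (l.count (l.foldl max m) : Int)) := by
  induction l with
  | nil => intro m c; simp
  | cons x t ih =>
    intro m c
    simp only [List.foldl_cons, List.count_cons]
    by_cases hgt : x > m
    · rw [if_pos hgt, ih x 1]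
      have hmax : max m x = x := max_eq_right (le_of_lt hgt)
      simp only [hmax]
      have hle : x ≤ t.foldl max x := (PySem.List.le_foldl_max t x).1
      by_cases he : t.foldl max x = x
      · have hne : ¬ t.foldl max x = m := by rw [he]; exact fun h => absurd h (ne_of_gt hgt)
        rw [if_pos he, if_neg hne, he]
        simp
        omega
      · have hne : ¬ t.foldl max x = m := by
          intro h; apply he; have := hle; omega
        rw [if_neg he, if_neg hne]
        have hxne : ¬ (x == t.foldl max x) = true := by
          simp; intro h; exact he h.symm
        simp [hxne]
    · rw [if_neg hgt]
      have hmax : max m x = m := max_eq_left (le_of_not_gt hgt)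
      by_cases heq : x = m
      · rw [if_pos heq, ih m (c+1)]; simp only [hmax]
        have hle : m ≤ t.foldl max m := (PySem.List.le_foldl_max t m).1
        by_cases he : t.foldl max m = m
        · rw [if_pos he, if_pos he, he, heq]
          simp
          omega
        · rw [if_neg he, if_neg he]
          have hxne : ¬ (x == t.foldl max m) = true := by
            simp; rw [heq]; intro h; exact he h.symm
          simp [hxne]
      · rw [if_neg heq, ih m c]; simp only [hmax]
        have hle : m ≤ t.foldl max m := (PySem.List.le_foldl_max t m).1
        have hxne : ¬ (x == t.foldl max m) = true := by
          simp; intro h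
          have : x ≤ m := le_of_not_gt hgt
          omega
        simp [hxne]

-- ===== VERDICT (by name: the statement is the Claim_ definition above) =====
theorem maxValNumOfOccurrences_spec : Claim_equal_maxValNumOfOccurrences := by
  intro nums _ hpre
  unfold Spec_maxValNumOfOccurrences maxValNumOfOccurrences maxValNumOfOccurrences_alt
  match nums, hpre with
  | x :: t, _ =>
    rw [PySem.List.max?_id_cons]
    simp only [List.foldl_cons]
    have h0 : PySem.List.pyGet? (x :: t) 0 = some x := by
      simp [PySem.List.pyGet?, PySem.List.pyIdx?]
    rw [h0]
    simp only [lt_irrefl, if_false, if_true]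
    rw [show (0:Int) + 1 = 1 from rfl, foldA_eq t x 1]
    have hle : x ≤ t.foldl max x := (PySem.List.le_foldl_max t x).1
    simp only [PySem.List.count, List.count_cons]
    by_cases he : t.foldl max x = x
    · rw [if_pos he, he]
      simp
      omega
    · rw [if_neg he]
      have hxne : ¬ (x == t.foldl max x) = true := by
        simp; intro h; exact he h.symm
      simp [hxne]
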